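-- pv_equiv track=rewrite | github.com/wisent-ai/wisent | wisent/core/primitives/model_interface/core/activations/hooks/activations_collector.py | _select_indices
-- ===== SOURCE A (Python) =====
-- from typing import Sequence, TYPE_CHECKING
--
-- def _select_indices(layer_names: Sequence[str] | None, n_blocks: int) -> list[int]:
--     """Map layer names '1'..'L' -> indices 0..L-1."""
--     if not layer_names:
--         return list(range(n_blocks))
--     out: list[int] = []
--     for name in layer_names:
--         try:
--             i = int(name)
--         except ValueError:
--             raise KeyError(f"Layer name must be numeric string like '3', got {name!r}")
--         if not (1 <= i <= n_blocks):
--             raise IndexError(f"Layer '{i}' out of range 1..{n_blocks}")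
--         out.append(i - 1)
--     return sorted(set(out))
-- ===== SOURCE B (Python) =====
-- def _select_indices(layer_names, n_blocks):
--     """Map layer names '1'..'L' -> indices 0..L-1."""
--     if not layer_names:
--         return list(range(n_blocks))
--     seen = [False] * n_blocks
--     for name in layer_names:
--         try:
--             i = int(name)
--         except ValueError:
--             raise KeyError(f"Layer name must be numeric string like '3', got {name!r}")
--         if not (1 <= i <= n_blocks):
--             raise IndexError(f"Layer '{i}' out of range 1..{n_blocks}")
--         seen[i - 1] = True
--     return [idx for idx in range(n_blocks) if seen[idx]]
-- ===== Notes on version B (the rewrite author's own statement) =====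
-- stated objective: alternative
-- what changed: Replaces the collect-then-sorted(set(...)) pass with a boolean presence array of length n_blocks marked during the loop, emitting the result by one forward scan over range(n_blocks), so no sort and no set are needed.
import Mathlib
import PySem

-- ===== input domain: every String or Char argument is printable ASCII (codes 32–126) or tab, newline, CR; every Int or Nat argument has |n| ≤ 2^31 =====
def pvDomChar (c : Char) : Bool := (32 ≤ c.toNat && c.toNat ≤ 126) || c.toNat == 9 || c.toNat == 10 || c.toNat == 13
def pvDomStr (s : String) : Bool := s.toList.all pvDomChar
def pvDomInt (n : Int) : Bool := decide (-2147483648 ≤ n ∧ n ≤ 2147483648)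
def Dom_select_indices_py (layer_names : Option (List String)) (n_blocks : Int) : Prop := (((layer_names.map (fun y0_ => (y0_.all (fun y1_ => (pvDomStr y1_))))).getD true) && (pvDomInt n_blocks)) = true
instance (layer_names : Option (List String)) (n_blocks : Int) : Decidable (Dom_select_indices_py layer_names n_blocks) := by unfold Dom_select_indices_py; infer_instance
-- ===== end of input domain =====

-- B replaces A's collect-then-sorted(set(...)) with a boolean presence array scanned once; alternative decomposition, return values identical on Pre_.

-- ===== PORT A =====
def select_indices_py (layer_names : Option (List String)) (n_blocks : Int) : List Int :=
  match layer_names with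
  | none => PySem.List.pyRange 0 n_blocks 1
  | some [] => PySem.List.pyRange 0 n_blocks 1
  | some names =>
      let out : List Int := names.foldl (fun acc name =>
        match PySem.Int.ofStr? name with
        | none => acc            -- KeyError in Python; excluded by Pre_
        | some i =>
          if 1 ≤ i ∧ i ≤ n_blocks then acc ++ [i - 1]
          else acc               -- IndexError in Python; excluded by Pre_
        ) []
      PySem.List.sorted (PySem.Set.ofList out) (fun x => x) false

-- ===== PORT B =====
def select_indices_py_alt (layer_names : Option (List String)) (n_blocks : Int) : List Int :=
  -- 'if not layer_names': true iff layer_names is None or the empty list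
  let names := layer_names.getD []
  if names.isEmpty then PySem.List.pyRange 0 n_blocks 1
  else
      let seen : List Bool := names.foldl (fun seen name =>
        match PySem.Int.ofStr? name with
        | none => seen           -- KeyError in Python; excluded by Pre_
        | some i =>
          if 1 ≤ i ∧ i ≤ n_blocks then PySem.List.pySetD seen (i - 1) true
          else seen              -- IndexError in Python; excluded by Pre_
        ) (List.replicate n_blocks.toNat false)
      (PySem.List.pyRange 0 n_blocks 1).filter (fun idx => PySem.List.pyGetD seen idx false)

-- ===== PRECONDITION & SPEC =====
-- Pre_ excludes exactly the inputs where A raises: a name that is not an int literal (KeyError)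
-- or parses to an integer outside 1..n_blocks (IndexError).
def Pre_select_indices_py (layer_names : Option (List String)) (n_blocks : Int) : Prop :=
  ∀ s ∈ layer_names.getD [],
    ((PySem.Int.ofStr? s).elim false (fun i => decide (1 ≤ i ∧ i ≤ n_blocks))) = true
instance (layer_names : Option (List String)) (n_blocks : Int) : Decidable (Pre_select_indices_py layer_names n_blocks) := by unfold Pre_select_indices_py; infer_instance

def pvWitness_select_indices_py : Option (List String) × Int := (some ["3", "1", "3"], 5)

def Spec_select_indices_py (layer_names : Option (List String)) (n_blocks : Int) (out : List Int) : Prop := out = select_indices_py_alt layer_names n_blocks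
instance (layer_names : Option (List String)) (n_blocks : Int) (out : List Int) : Decidable (Spec_select_indices_py layer_names n_blocks out) := by unfold Spec_select_indices_py; infer_instance

-- ===== CLAIM (what is proved, stated in full; the proofs are below) =====
def Claim_equal_select_indices_py : Prop := ∀ (layer_names : Option (List String)) (n_blocks : Int), Dom_select_indices_py layer_names n_blocks → Pre_select_indices_py layer_names n_blocks → Spec_select_indices_py layer_names n_blocks (select_indices_py layer_names n_blocks)

-- ===== LEMMAS AND PROOFS =====

-- x ends up in A's accumulator iff some name parses to x+1 within range
theorem pv_out_mem (names : List String) (n : Int) (acc : List Int) (x : Int) :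
    x ∈ names.foldl (fun acc name =>
        match PySem.Int.ofStr? name with
        | none => acc
        | some i => if 1 ≤ i ∧ i ≤ n then acc ++ [i - 1] else acc) acc ↔
      x ∈ acc ∨ ∃ nm ∈ names, ∃ i, PySem.Int.ofStr? nm = some i ∧ 1 ≤ i ∧ i ≤ n ∧ i - 1 = x := by
  induction names generalizing acc with
  | nil => simp
  | cons nm rest ih =>
    simp only [List.foldl_cons]
    cases h : PySem.Int.ofStr? nm with
    | none =>
      simp only [ih]
      constructor
      · rintro (hx | ⟨m, hm, hi⟩)
        · exact Or.inl hx
        · exact Or.inr ⟨m, List.mem_cons_of_mem _ hm, hi⟩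
      · rintro (hx | ⟨m, hm, i, hp, hi⟩)
        · exact Or.inl hx
        · rcases List.mem_cons.mp hm with rfl | hm
          · simp [h] at hp
          · exact Or.inr ⟨m, hm, i, hp, hi⟩
    | some i =>
      by_cases hg : 1 ≤ i ∧ i ≤ n
      · simp only [if_pos hg, ih, List.mem_append, List.mem_singleton]
        constructor
        · rintro ((hx | rfl) | ⟨m, hm, hi⟩)
          · exact Or.inl hx
          · exact Or.inr ⟨nm, List.mem_cons_self, i, h, hg.1, hg.2, rfl⟩
          · exact Or.inr ⟨m, List.mem_cons_of_mem _ hm, hi⟩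
        · rintro (hx | ⟨m, hm, j, hp, h1, h2, hj⟩)
          · exact Or.inl (Or.inl hx)
          · rcases List.mem_cons.mp hm with rfl | hm
            · rw [h] at hp; cases hp; exact Or.inl (Or.inr hj.symm)
            · exact Or.inr ⟨m, hm, j, hp, h1, h2, hj⟩
      · simp only [if_neg hg, ih]
        constructor
        · rintro (hx | ⟨m, hm, hi⟩)
          · exact Or.inl hx
          · exact Or.inr ⟨m, List.mem_cons_of_mem _ hm, hi⟩
        · rintro (hx | ⟨m, hm, j, hp, h1, h2, hj⟩)
          · exact Or.inl hx
          · rcases List.mem_cons.mp hm with rfl | hm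
            · rw [h] at hp; cases hp; exact absurd ⟨h1, h2⟩ hg
            · exact Or.inr ⟨m, hm, j, hp, h1, h2, hj⟩

-- invariant of B's presence-array fold: length is preserved and cell k records whether
-- some name parses to k+1 within range
theorem pv_seen_inv (names : List String) (n : Int) (seen0 : List Bool)
    (hlen : seen0.length = n.toNat) (k : Nat) (hk : k < n.toNat) :
    (names.foldl (fun seen name =>
        match PySem.Int.ofStr? name with
        | none => seen
        | some i => if 1 ≤ i ∧ i ≤ n then PySem.List.pySetD seen (i - 1) true else seen) seen0).length = n.toNat ∧
    ((names.foldl (fun seen name =>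
        match PySem.Int.ofStr? name with
        | none => seen
        | some i => if 1 ≤ i ∧ i ≤ n then PySem.List.pySetD seen (i - 1) true else seen) seen0).getD k false = true ↔
      seen0.getD k false = true ∨ ∃ nm ∈ names, ∃ i, PySem.Int.ofStr? nm = some i ∧ 1 ≤ i ∧ i ≤ n ∧ i - 1 = (k : Int)) := by
  induction names generalizing seen0 with
  | nil => simp [hlen]
  | cons nm rest ih =>
    simp only [List.foldl_cons]
    cases h : PySem.Int.ofStr? nm with
    | none =>
      obtain ⟨l1, l2⟩ := ih seen0 hlen
      refine ⟨l1, l2.trans ?_⟩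
      constructor
      · rintro (hx | ⟨m, hm, hi⟩)
        · exact Or.inl hx
        · exact Or.inr ⟨m, List.mem_cons_of_mem _ hm, hi⟩
      · rintro (hx | ⟨m, hm, i, hp, hi⟩)
        · exact Or.inl hx
        · rcases List.mem_cons.mp hm with rfl | hm
          · simp [h] at hp
          · exact Or.inr ⟨m, hm, i, hp, hi⟩
    | some i =>
      by_cases hg : 1 ≤ i ∧ i ≤ n
      · simp only [if_pos hg]
        have h0 : (0 : Int) ≤ i - 1 := by omega
        rw [PySem.List.pySetD_of_nonneg seen0 true h0]
        have hlen' : (seen0.set (i - 1).toNat true).length = n.toNat := by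
          simp [hlen]
        obtain ⟨l1, l2⟩ := ih _ hlen'
        refine ⟨l1, l2.trans ?_⟩
        have hmlt : (i - 1).toNat < seen0.length := by omega
        constructor
        · rintro (hx | ⟨m, hm, hi⟩)
          · by_cases hkm : k = (i - 1).toNat
            · subst hkm
              exact Or.inr ⟨nm, List.mem_cons_self, i, h, hg.1, hg.2, by omega⟩
            · rw [List.getD_eq_getElem?_getD, List.getElem?_set_ne (by omega)] at hx
              exact Or.inl (by rw [List.getD_eq_getElem?_getD]; exact hx)
          · exact Or.inr ⟨m, List.mem_cons_of_mem _ hm, hi⟩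
        · rintro (hx | ⟨m, hm, j, hp, h1, h2, hj⟩)
          · by_cases hkm : k = (i - 1).toNat
            · subst hkm
              refine Or.inl ?_
              rw [List.getD_eq_getElem?_getD, List.getElem?_set_self (by omega)]
              rfl
            · refine Or.inl ?_
              rw [List.getD_eq_getElem?_getD, List.getElem?_set_ne (by omega),
                ← List.getD_eq_getElem?_getD]
              exact hx
          · rcases List.mem_cons.mp hm with rfl | hm
            · rw [h] at hp; injection hp with hij; subst hij
              refine Or.inl ?_
              have : k = (i - 1).toNat := by omega
              subst this
              rw [List.getD_eq_getElem?_getD, List.getElem?_set_self (by omega)]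
              rfl
            · exact Or.inr ⟨m, hm, j, hp, h1, h2, hj⟩
      · simp only [if_neg hg]
        obtain ⟨l1, l2⟩ := ih seen0 hlen
        refine ⟨l1, l2.trans ?_⟩
        constructor
        · rintro (hx | ⟨m, hm, hi⟩)
          · exact Or.inl hx
          · exact Or.inr ⟨m, List.mem_cons_of_mem _ hm, hi⟩
        · rintro (hx | ⟨m, hm, j, hp, h1, h2, hj⟩)
          · exact Or.inl hx
          · rcases List.mem_cons.mp hm with rfl | hm
            · rw [h] at hp; cases hp; exact absurd ⟨h1, h2⟩ hg
            · exact Or.inr ⟨m, hm, j, hp, h1, h2, hj⟩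

-- ===== VERDICT (by name: the statement is the Claim_ definition above) =====
theorem select_indices_py_spec : Claim_equal_select_indices_py := by
  intro layer_names n _hdom _hpre
  unfold Spec_select_indices_py select_indices_py select_indices_py_alt
  match layer_names with
  | none => rfl
  | some [] => rfl
  | some (nm0 :: names') =>
    simp only []
    set names := nm0 :: names' with hnames
    set F := fun (acc : List Int) (name : String) =>
      match PySem.Int.ofStr? name with
      | none => acc
      | some i => if 1 ≤ i ∧ i ≤ n then acc ++ [i - 1] else acc with hF
    set G := fun (seen : List Bool) (name : String) =>
      match PySem.Int.ofStr? name with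
      | none => seen
      | some i => if 1 ≤ i ∧ i ≤ n then PySem.List.pySetD seen (i - 1) true else seen with hG
    set out := names.foldl F [] with hout
    set seen := names.foldl G (List.replicate n.toNat false) with hseen
    have hrep : (List.replicate n.toNat false).length = n.toNat := by simp
    -- characterize membership in B's filter list
    have hfilter_mem : ∀ x : Int,
        x ∈ (PySem.List.pyRange 0 n 1).filter (fun idx => PySem.List.pyGetD seen idx false) ↔
        ∃ m ∈ names, ∃ i, PySem.Int.ofStr? m = some i ∧ 1 ≤ i ∧ i ≤ n ∧ i - 1 = x := by
      intro x
      rw [List.mem_filter, PySem.List.mem_pyRange_one]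
      constructor
      · rintro ⟨⟨hx0, hxn⟩, hp⟩
        have hk : x.toNat < n.toNat := by omega
        obtain ⟨_, hiff⟩ := pv_seen_inv names n _ hrep x.toNat hk
        rw [PySem.List.pyGetD_of_nonneg seen false hx0] at hp
        rcases hiff.mp hp with hx | ⟨m, hm, i, hpi, h1, h2, hi⟩
        · rw [List.getD_eq_getElem?_getD] at hx
          simp [hk] at hx
        · exact ⟨m, hm, i, hpi, h1, h2, by omega⟩
      · rintro ⟨m, hm, i, hpi, h1, h2, hi⟩
        have hx0 : (0 : Int) ≤ x := by omega
        have hxn : x < n := by omega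
        have hk : x.toNat < n.toNat := by omega
        obtain ⟨_, hiff⟩ := pv_seen_inv names n _ hrep x.toNat hk
        refine ⟨⟨hx0, hxn⟩, ?_⟩
        rw [PySem.List.pyGetD_of_nonneg seen false hx0]
        exact hiff.mpr (Or.inr ⟨m, hm, i, hpi, h1, h2, by omega⟩)
    -- the filter list is a strictly increasing rearrangement of set(out)
    refine PySem.List.sorted_eq_of_perm_of_pairwise_lt (PySem.Set.ofList out)
      ((PySem.List.pyRange 0 n 1).filter (fun idx => PySem.List.pyGetD seen idx false))
      (fun x => x) ?_ ?_
    · refine (List.perm_ext_iff_of_nodup ?_ (PySem.Set.nodup_ofList out)).mpr ?_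
      · exact (PySem.List.pairwise_lt_pyRange_one 0 n).filter _ |>.nodup
      · intro x
        rw [hfilter_mem, PySem.Set.mem_ofList, hout, pv_out_mem names n [] x]
        simp
    · exact (PySem.List.pairwise_lt_pyRange_one 0 n).filter _
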